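-- pv_equiv track=rewrite | github.com/HZEmpire/HKU-ENGG1330-Notakto | Notakto.py | reset
-- ===== SOURCE A (Python) =====
-- def turn(x):
--     g=[0 for i in range(9)]
--     g[0],g[1],g[2],g[3],g[4],g[5],g[6],g[7],g[8]=x[2],x[5],x[8],x[1],x[4],x[7],x[0],x[3],x[6]
--     return g
--
-- def chazhao(x):
--     put=0
--     for i in range(len(onelist)):
--         if onelist[i]==x:
--             put='one'
--             return put
--     for i in range(len(alist)):
--         if alist[i]==x:
--             put='a'
--             return put
--     for i in range(len(blist)):
--         if blist[i]==x:
--             put='b'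
--             return put
--     for i in range(len(dlist)):
--         if dlist[i]==x:
--             put='d'
--             return put
--     for i in range(len(ablist)):
--         if ablist[i]==x:
--             put='ab'
--             return put
--     for i in range(len(adlist)):
--         if adlist[i]==x:
--             put='ad'
--             return put
--     return put
--
-- def reset(x,y):
--     x1=x[:]
--     if situation[y]==0:
--         return 'one'
--     elif x1.count('X')==0:
--         return 'c'
--     elif x1.count('X')==1 and x1[4]=='X':
--         return 'cc'
--     for i in range(4):
--         chu=[]
--         for j in range(9):
--             if x1[j]=='X':
--                 chu.append(j)
--         s1s=chazhao(chu)
--         if s1s!=0: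
--             return s1s
--         x1=turn(x1)
--
-- onelist=[[0],[1],[0,5,7]]
--
-- alist=[[0,8],[1,3],[1,7],[0,2,4],[0,2,7],[0,4,5],[0,1,6],[0,1,3,4],[0,1,3,5],[0,1,3,8],[0,1,7,8],[0,2,6,8],[1,3,5,7],[0,1,4,5,6],[0,1,5,6,7],[0,1,5,6,8],[0,1,3,5,7,8],[1,2,8],[2,3,4],[1,2,3,5],[1,2,6,7],[1,2,3,4,8]]
--
-- blist=[[0,2],[0,4],[0,5],[1,4],[0,1,3],[1,3,5],[0,1,4,5],[0,1,4,6],[0,1,5,6],[0,1,6,7],[0,1,6,8],[0,2,4,7],[0,4,5,7],[0,1,3,5,7],[0,1,3,5,8],[2,3],[1,2,3,4],[1,2,4,8],[1,2,3,8],[1,2,7,8],[1,2,6,8],[1,2,3,5,6]]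
--
-- dlist=[[0,1,5],[0,1,7],[0,1,8],[1,2,3],[1,2,7],[1,2,6]]
--
-- ablist=[[0,1,4],[0,2,6],[1,3,4],[0,1,5,7],[0,1,5,8],[1,2,4],[1,2,3,7]]
--
-- adlist=[[0,1],[1,2]]
--
-- situation=[0,1,1,1]
-- ===== SOURCE B (Python) =====
-- # B: one precomputed dict from canonical X-index tuples to labels replaces the
-- # 4-iteration rotate-and-rescan loop; the three guards are unchanged.
--
-- situation = [0, 1, 1, 1]
--
-- onelist=[[0],[1],[0,5,7]]
-- alist=[[0,8],[1,3],[1,7],[0,2,4],[0,2,7],[0,4,5],[0,1,6],[0,1,3,4],[0,1,3,5],[0,1,3,8],[0,1,7,8],[0,2,6,8],[1,3,5,7],[0,1,4,5,6],[0,1,5,6,7],[0,1,5,6,8],[0,1,3,5,7,8],[1,2,8],[2,3,4],[1,2,3,5],[1,2,6,7],[1,2,3,4,8]]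
-- blist=[[0,2],[0,4],[0,5],[1,4],[0,1,3],[1,3,5],[0,1,4,5],[0,1,4,6],[0,1,5,6],[0,1,6,7],[0,1,6,8],[0,2,4,7],[0,4,5,7],[0,1,3,5,7],[0,1,3,5,8],[2,3],[1,2,3,4],[1,2,4,8],[1,2,3,8],[1,2,7,8],[1,2,6,8],[1,2,3,5,6]]
-- dlist=[[0,1,5],[0,1,7],[0,1,8],[1,2,3],[1,2,7],[1,2,6]]
-- ablist=[[0,1,4],[0,2,6],[1,3,4],[0,1,5,7],[0,1,5,8],[1,2,4],[1,2,3,7]]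
-- adlist=[[0,1],[1,2]]
--
-- _PERM = [2, 5, 8, 1, 4, 7, 0, 3, 6]
--
-- def _build_table():
--     table = {}
--     p = list(range(9))          # p = perm^k; x after k turns satisfies x_k[j] == x[p[j]]
--     for _ in range(4):
--         for label, lst in [('one', onelist), ('a', alist), ('b', blist),
--                            ('d', dlist), ('ab', ablist), ('ad', adlist)]:
--             for pat in lst:
--                 table.setdefault(tuple(sorted(p[j] for j in pat)), label)
--         p = [p[_PERM[j]] for j in range(9)]
--     return table
--
-- _TABLE = _build_table()
--
-- def reset(x, y):
--     if situation[y] == 0: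
--         return 'one'
--     n = x.count('X')
--     if n == 0:
--         return 'c'
--     if n == 1 and x[4] == 'X':
--         return 'cc'
--     key = tuple(j for j in range(9) if x[j] == 'X')
--     return _TABLE.get(key)
-- ===== Notes on version B (the rewrite author's own statement) =====
-- stated objective: alternative
-- what changed: Replaces A's 4-iteration rotate-the-board-and-rescan-six-lists loop by a single dict precomputed once (in A's rotation-outer, list-priority-inner order with setdefault) from canonical X-index tuples to labels, so reset does one tuple lookup instead of rotating and scanning.
import Mathlib
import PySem

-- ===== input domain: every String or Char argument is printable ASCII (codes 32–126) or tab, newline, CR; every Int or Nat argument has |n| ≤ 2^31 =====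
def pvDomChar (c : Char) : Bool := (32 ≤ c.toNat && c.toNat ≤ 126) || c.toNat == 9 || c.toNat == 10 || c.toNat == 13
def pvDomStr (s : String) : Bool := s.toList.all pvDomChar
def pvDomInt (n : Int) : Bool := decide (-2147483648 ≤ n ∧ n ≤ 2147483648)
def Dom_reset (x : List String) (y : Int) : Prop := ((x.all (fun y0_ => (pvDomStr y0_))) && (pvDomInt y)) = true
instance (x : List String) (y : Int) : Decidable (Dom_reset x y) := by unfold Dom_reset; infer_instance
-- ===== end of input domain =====

-- B replaces A's rotate-and-rescan classification loop by ONE precomputed dict from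
-- canonical X-index lists to labels (built once in A's precedence order); the guards stay.

-- ===== PORT A =====
def situationA : List Int := [0, 1, 1, 1]
def onelistA : List (List Nat) := [[0],[1],[0,5,7]]
def alistA : List (List Nat) := [[0,8],[1,3],[1,7],[0,2,4],[0,2,7],[0,4,5],[0,1,6],[0,1,3,4],[0,1,3,5],[0,1,3,8],[0,1,7,8],[0,2,6,8],[1,3,5,7],[0,1,4,5,6],[0,1,5,6,7],[0,1,5,6,8],[0,1,3,5,7,8],[1,2,8],[2,3,4],[1,2,3,5],[1,2,6,7],[1,2,3,4,8]]
def blistA : List (List Nat) := [[0,2],[0,4],[0,5],[1,4],[0,1,3],[1,3,5],[0,1,4,5],[0,1,4,6],[0,1,5,6],[0,1,6,7],[0,1,6,8],[0,2,4,7],[0,4,5,7],[0,1,3,5,7],[0,1,3,5,8],[2,3],[1,2,3,4],[1,2,4,8],[1,2,3,8],[1,2,7,8],[1,2,6,8],[1,2,3,5,6]]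
def dlistA : List (List Nat) := [[0,1,5],[0,1,7],[0,1,8],[1,2,3],[1,2,7],[1,2,6]]
def ablistA : List (List Nat) := [[0,1,4],[0,2,6],[1,3,4],[0,1,5,7],[0,1,5,8],[1,2,4],[1,2,3,7]]
def adlistA : List (List Nat) := [[0,1],[1,2]]

-- turn(x): g[j] = x[perm[j]]; inside Pre_ the loop only runs with x.length ≥ 9, where getD = Python indexing
def turnA (x : List String) : List String :=
  [x.getD 2 "", x.getD 5 "", x.getD 8 "", x.getD 1 "", x.getD 4 "",
   x.getD 7 "", x.getD 0 "", x.getD 3 "", x.getD 6 ""]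

-- chu = [j for j in range(9) if x1[j]=='X']  (append loop)
def chuA (x : List String) : List Nat :=
  (List.range 9).foldl (fun acc j => if x.getD j "" == "X" then acc ++ [j] else acc) []

-- chazhao: six scans in order; 'none' is Python's 0 (no match)
def chazhao (c : List Nat) : Option String :=
  if onelistA.contains c then some "one"
  else if alistA.contains c then some "a"
  else if blistA.contains c then some "b"
  else if dlistA.contains c then some "d"
  else if ablistA.contains c then some "ab"
  else if adlistA.contains c then some "ad"
  else none

-- for i in range(4): build chu; if chazhao != 0 return; x1 = turn(x1)   (fall-through = None)
def resetLoop (x1 : List String) : Nat → Option String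
  | 0 => none
  | n + 1 =>
    match chazhao (chuA x1) with
    | some s => some s
    | none => resetLoop (turnA x1) n

def reset (x : List String) (y : Int) : Option String :=
  match PySem.List.pyGet? situationA y with
  | none => none  -- IndexError on situation[y]; excluded by Pre_reset
  | some s =>
    if s = 0 then some "one"
    else if PySem.List.count x "X" = 0 then some "c"
    else if PySem.List.count x "X" = 1 ∧ x.getD 4 "" = "X" then some "cc"
    else resetLoop x 4

-- ===== PORT B =====  (shares the six pattern lists and situation with port A: same module-level data)
def permB : List Nat := [2, 5, 8, 1, 4, 7, 0, 3, 6]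

def labelListsB : List (String × List (List Nat)) :=
  [("one", onelistA), ("a", alistA), ("b", blistA), ("d", dlistA), ("ab", ablistA), ("ad", adlistA)]

-- one rotation's table entries: setdefault(sorted(p[j] for j in pat), label)
def tableStepB (p : List Nat) (t : PySem.Dict (List Nat) String) : PySem.Dict (List Nat) String :=
  labelListsB.foldl
    (fun t pr => pr.2.foldl
      (fun t pat => t.setdefault (PySem.List.sorted (pat.map (fun j => p.getD j 0)) (fun v => v) false) pr.1) t) t

-- for _ in range(4): add entries for p = perm^k; then p = [p[perm[j]] for j in range(9)]
def buildTableB : Nat → List Nat → PySem.Dict (List Nat) String → PySem.Dict (List Nat) String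
  | 0, _, t => t
  | n + 1, p, t => buildTableB n ((List.range 9).map (fun j => p.getD (permB.getD j 0) 0)) (tableStepB p t)

def tableB : PySem.Dict (List Nat) String := buildTableB 4 (List.range 9) PySem.Dict.empty

def reset_alt (x : List String) (y : Int) : Option String :=
  match PySem.List.pyGet? situationA y with
  | none => none  -- IndexError on situation[y]; excluded by Pre_reset
  | some s =>
    if s = 0 then some "one"
    else if PySem.List.count x "X" = 0 then some "c"
    else if PySem.List.count x "X" = 1 ∧ x.getD 4 "" = "X" then some "cc"
    else tableB.get? ((List.range 9).filter (fun j => x.getD j "" == "X"))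

-- ===== PRECONDITION & SPEC =====
-- Pre_ excludes exactly the inputs where Python A raises IndexError: y outside the
-- situation list, and boards too short for the accesses x1[4] / x1[j], j<9, it performs.
def Pre_reset (x : List String) (y : Int) : Prop :=
  (-4 ≤ y ∧ y ≤ 3) ∧
  (y = 0 ∨ y = -4 ∨ PySem.List.count x "X" = 0 ∨ 9 ≤ x.length ∨
    (PySem.List.count x "X" = 1 ∧ 5 ≤ x.length ∧ x.getD 4 "" = "X"))
instance (x : List String) (y : Int) : Decidable (Pre_reset x y) := by unfold Pre_reset; infer_instance

def pvWitness_reset : List String × Int := (["O","O","O","O","O","O","O","O","O"], 1)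

def Spec_reset (x : List String) (y : Int) (out : Option String) : Prop := out = reset_alt x y
instance (x : List String) (y : Int) (out : Option String) : Decidable (Spec_reset x y out) := by unfold Spec_reset; infer_instance

-- ===== CLAIM (what is proved, stated in full; the proofs are below) =====
def Claim_equal_reset : Prop := ∀ (x : List String) (y : Int), Dom_reset x y → Pre_reset x y → Spec_reset x y (reset x y)

-- ===== LEMMAS AND PROOFS =====

-- proof-only helpers: the loop factored through the X-index list
def pullC (c : List Nat) : List Nat :=
  (List.range 9).filter (fun j => c.contains (permB.getD j 0))

def loopC (c : List Nat) : Nat → Option String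
  | 0 => none
  | n + 1 =>
    match chazhao c with
    | some s => some s
    | none => loopC (pullC c) n

theorem chuA_filter (x : List String) :
    chuA x = (List.range 9).filter (fun j => x.getD j "" == "X") := by
  simpa [chuA] using PySem.List.foldl_append_if_eq_filter (fun j => x.getD j "" == "X") (List.range 9) []

theorem mem_chu (x : List String) (j : Nat) (h : j < 9) :
    j ∈ chuA x ↔ x.getD j "" = "X" := by
  rw [chuA_filter]
  simp [List.mem_filter, List.mem_range, h]

theorem chuA_turn (x : List String) : chuA (turnA x) = pullC (chuA x) := by
  rw [chuA_filter, pullC]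
  refine List.filter_congr ?_
  intro a ha
  rw [List.mem_range] at ha
  interval_cases a <;>
    simp [turnA, permB, mem_chu, Bool.beq_eq_decide_eq]

theorem resetLoop_eq (n : Nat) (x : List String) : resetLoop x n = loopC (chuA x) n := by
  induction n generalizing x with
  | zero => rfl
  | succ n ih =>
    simp only [resetLoop, loopC]
    cases chazhao (chuA x) with
    | some s => rfl
    | none => rw [ih, chuA_turn]

def tableLit : PySem.Dict (List Nat) String := PySem.Dict.mk [([0], "one"), ([1], "one"), ([0,5,7], "one"), ([0,8], "a"), ([1,3], "a"), ([1,7], "a"), ([0,2,4], "a"), ([0,2,7], "a"), ([0,4,5], "a"), ([0,1,6], "a"), ([0,1,3,4], "a"), ([0,1,3,5], "a"), ([0,1,3,8], "a"), ([0,1,7,8], "a"), ([0,2,6,8], "a"), ([1,3,5,7], "a"), ([0,1,4,5,6], "a"), ([0,1,5,6,7], "a"), ([0,1,5,6,8], "a"), ([0,1,3,5,7,8], "a"), ([1,2,8], "a"), ([2,3,4], "a"), ([1,2,3,5], "a"), ([1,2,6,7], "a"), ([1,2,3,4,8], "a"), ([0,2], "b"), ([0,4], "b"), ([0,5], "b"),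 ([1,4], "b"), ([0,1,3], "b"), ([1,3,5], "b"), ([0,1,4,5], "b"), ([0,1,4,6], "b"), ([0,1,5,6], "b"), ([0,1,6,7], "b"), ([0,1,6,8], "b"), ([0,2,4,7], "b"), ([0,4,5,7], "b"), ([0,1,3,5,7], "b"), ([0,1,3,5,8], "b"), ([2,3], "b"), ([1,2,3,4], "b"), ([1,2,4,8], "b"), ([1,2,3,8], "b"), ([1,2,7,8], "b"), ([1,2,6,8], "b"), ([1,2,3,5,6], "b"), ([0,1,5], "d"), ([0,1,7], "d"), ([0,1,8], "d"), ([1,2,3], "d"), ([1,2,7], "d"), ([1,2,6], "d"), ([0,1,4], "ab"), ([0,2,6], "ab"), ([1,3,4], "ab"), ([0,1,5,7], "ab"), ([0,1,5,8], "ab"), ([1,2,4], "ab"), ([1,2,3,7], "ab"), ([0,1], "ad"), ([1,2], "ad"), ([2], "one"), ([5], "one"), ([2,3,7], "one"), ([2,6], "a"), ([1,5], "a"), ([3,5], "a"), ([2,4,8], "a"), ([2,3,8], "a"), ([2,4,7], "a"), ([0,2,5], "a"), ([1,2,4,5], "a"), ([1,2,5,7], "a"), ([1,2,5,6], "a"),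 ([2,3,5,6], "a"), ([0,2,4,5,7], "a"), ([0,2,3,5,7], "a"), ([0,2,5,6,7], "a"), ([1,2,3,5,6,7], "a"), ([5,6,8], "a"), ([1,4,8], "a"), ([1,5,7,8], "a"), ([0,3,5,8], "a"), ([1,4,5,6,8], "a"), ([2,8], "b"), ([2,4], "b"), ([2,7], "b"), ([4,5], "b"), ([1,2,5], "b"), ([1,5,7], "b"), ([2,4,5,7], "b"), ([0,2,4,5], "b"), ([0,2,5,7], "b"), ([0,2,3,5], "b"), ([0,2,5,6], "b"), ([2,3,4,8], "b"), ([2,3,4,7], "b"), ([1,2,3,5,7], "b"), ([1,2,5,6,7], "b"), ([1,8], "b"), ([1,4,5,8], "b"), ([4,5,6,8], "b"), ([1,5,6,8], "b"), ([3,5,6,8], "b"), ([0,5,6,8], "b"), ([0,1,5,7,8], "b"), ([2,5,7], "d"), ([2,3,5], "d"), ([2,5,6], "d"), ([1,5,8], "d"), ([3,5,8], "d"), ([0,5,8], "d"), ([2,4,5], "ab"), ([0,2,8], "ab"), ([1,4,5], "ab"), ([2,3,5,7], "ab"), ([2,5,6,7], "ab"), ([4,5,8], "ab"), ([1,3,5,8],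 "ab"), ([2,5], "ad"), ([5,8], "ad"), ([8], "one"), ([7], "one"), ([1,3,8], "one"), ([5,7], "a"), ([4,6,8], "a"), ([1,6,8], "a"), ([3,4,8], "a"), ([2,7,8], "a"), ([4,5,7,8], "a"), ([3,5,7,8], "a"), ([0,5,7,8], "a"), ([2,3,4,7,8], "a"), ([1,2,3,7,8], "a"), ([0,2,3,7,8], "a"), ([0,6,7], "a"), ([4,5,6], "a"), ([3,5,6,7], "a"), ([0,4,5,6,7], "a"), ([6,8], "b"), ([4,8], "b"), ([3,8], "b"), ([4,7], "b"), ([5,7,8], "b"), ([3,5,7], "b"), ([3,4,7,8], "b"), ([2,4,7,8], "b"), ([2,3,7,8], "b"), ([0,2,7,8], "b"), ([1,4,6,8], "b"), ([1,3,4,8], "b"), ([1,3,5,7,8], "b"), ([0,3,5,7,8], "b"), ([5,6], "b"), ([4,5,6,7], "b"), ([0,4,6,7], "b"), ([0,5,6,7], "b"), ([0,2,6,7], "b"), ([2,3,5,6,7], "b"), ([3,7,8], "d"), ([1,7,8], "d"), ([0,7,8], "d"), ([5,6,7], "d"), ([1,6,7], "d"), ([2,6,7], "d"), ([4,7,8],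 "ab"), ([2,6,8], "ab"), ([4,5,7], "ab"), ([1,3,7,8], "ab"), ([0,3,7,8], "ab"), ([4,6,7], "ab"), ([1,5,6,7], "ab"), ([7,8], "ad"), ([6,7], "ad"), ([6], "one"), ([3], "one"), ([1,5,6], "one"), ([3,7], "a"), ([0,4,6], "a"), ([0,5,6], "a"), ([1,4,6], "a"), ([3,6,8], "a"), ([3,4,6,7], "a"), ([1,3,6,7], "a"), ([2,3,6,7], "a"), ([1,3,4,6,8], "a"), ([1,3,5,6,8], "a"), ([1,2,3,6,8], "a"), ([0,2,3], "a"), ([0,4,7], "a"), ([0,1,3,7], "a"), ([0,2,3,4,7], "a"), ([0,6], "b"), ([4,6], "b"), ([1,6], "b"), ([3,4], "b"), ([3,6,7], "b"), ([1,3,7], "b"), ([1,3,4,6], "b"), ([3,4,6,8], "b"), ([1,3,6,8], "b"), ([2,3,6,8], "b"), ([0,4,5,6], "b"), ([1,4,5,6], "b"), ([1,3,5,6,7], "b"), ([1,2,3,6,7], "b"), ([0,7], "b"), ([0,3,4,7], "b"), ([0,2,3,4], "b"), ([0,2,3,7], "b"), ([0,2,3,8], "b"), ([0,1,3,7,8],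 "b"), ([1,3,6], "d"), ([3,5,6], "d"), ([2,3,6], "d"), ([0,3,7], "d"), ([0,3,5], "d"), ([0,3,8], "d"), ([3,4,6], "ab"), ([0,6,8], "ab"), ([3,4,7], "ab"), ([1,3,5,6], "ab"), ([1,2,3,6], "ab"), ([0,3,4], "ab"), ([0,3,5,7], "ab"), ([3,6], "ad"), ([0,3], "ad")]

theorem tableB_eval : tableB = tableLit := by
  set_option maxRecDepth 100000 in set_option maxHeartbeats 4000000 in decide

set_option maxRecDepth 100000 in
set_option maxHeartbeats 16000000 in
theorem key_lemma (p : Nat → Bool) :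
    loopC ((List.range 9).filter p) 4 = tableB.get? ((List.range 9).filter p) := by
  have h : ∀ (b0 b1 b2 b3 b4 b5 b6 b7 b8 : Bool),
      loopC ((List.range 9).filter (fun j => [b0,b1,b2,b3,b4,b5,b6,b7,b8].getD j false)) 4 =
      tableLit.get? ((List.range 9).filter (fun j => [b0,b1,b2,b3,b4,b5,b6,b7,b8].getD j false)) := by
    decide
  have e : (List.range 9).filter p =
      (List.range 9).filter (fun j => [p 0, p 1, p 2, p 3, p 4, p 5, p 6, p 7, p 8].getD j false) := by
    refine List.filter_congr ?_
    intro a ha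
    rw [List.mem_range] at ha
    interval_cases a <;> rfl
  rw [e, tableB_eval]
  exact h (p 0) (p 1) (p 2) (p 3) (p 4) (p 5) (p 6) (p 7) (p 8)

theorem loop_eq_lookup (x : List String) :
    resetLoop x 4 = tableB.get? ((List.range 9).filter (fun j => x.getD j "" == "X")) := by
  rw [resetLoop_eq, chuA_filter]
  exact key_lemma _

-- ===== VERDICT (by name: the statement is the Claim_ definition above) =====
theorem reset_spec : Claim_equal_reset := by
  intro x y _ _
  unfold Spec_reset reset reset_alt
  cases PySem.List.pyGet? situationA y with
  | none => rfl
  | some s =>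
    dsimp only
    by_cases h0 : s = 0
    · rw [if_pos h0, if_pos h0]
    · rw [if_neg h0, if_neg h0]
      by_cases hc : PySem.List.count x "X" = 0
      · rw [if_pos hc, if_pos hc]
      · rw [if_neg hc, if_neg hc]
        by_cases hcc : PySem.List.count x "X" = 1 ∧ x.getD 4 "" = "X"
        · rw [if_pos hcc, if_pos hcc]
        · rw [if_neg hcc, if_neg hcc]
          exact loop_eq_lookup x
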